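-- pv_equiv track=rewrite | github.com/YunlongXing/DESAN | analysis_utils.py | find_aliasing_pairs
-- ===== SOURCE A (Python) =====
-- from typing import Callable, Dict, Iterable, List, Optional, Set, Tuple
--
-- def may_alias(a: str, b: str, pts: Dict[str, Set[str]]) -> bool:
--     """Determine if two pointer values may alias using points‑to sets."""
--     set_a = pts.get(a)
--     set_b = pts.get(b)
--     if set_a is None or set_b is None:
--         return False
--     return not set_a.isdisjoint(set_b)
--
-- def find_aliasing_pairs(values: Iterable[str], pts: Dict[str, Set[str]]) -> List[Tuple[str, str]]:
--     """Return all unordered pairs of values that may alias."""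
--     vals = list(values)
--     pairs: List[Tuple[str, str]] = []
--     for i in range(len(vals)):
--         for j in range(i + 1, len(vals)):
--             if may_alias(vals[i], vals[j], pts):
--                 pairs.append((vals[i], vals[j]))
--     return pairs
-- ===== SOURCE B (Python) =====
-- from typing import Dict, Iterable, List, Set, Tuple
--
-- def find_aliasing_pairs(values: Iterable[str], pts: Dict[str, Set[str]]) -> List[Tuple[str, str]]:
--     """Return all unordered pairs of values that may alias (inverted-index version)."""
--     vals = list(values)
--     # Inverted index: pointed-to object -> indices of values whose points-to set contains it.
--     index: Dict[str, List[int]] = {}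
--     for i, v in enumerate(vals):
--         for obj in pts.get(v, ()):
--             index[obj] = index.get(obj, []) + [i]
--     pairs: List[Tuple[str, str]] = []
--     for i, v in enumerate(vals):
--         partners: Set[int] = set()
--         for obj in pts.get(v, ()):
--             partners.update(index.get(obj, ()))
--         for j in sorted(partners):
--             if j > i:
--                 pairs.append((vals[i], vals[j]))
--     return pairs
-- ===== Notes on version B (the rewrite author's own statement) =====
-- stated objective: faster
-- what changed: Replaced the O(n^2) all-pairs set-intersection scan by an inverted index from pointed-to object to value indices: each value's alias partners are the union of its objects' index groups, emitted in sorted index order, so work is proportional to the groups instead of all pairs.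
import Mathlib
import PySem

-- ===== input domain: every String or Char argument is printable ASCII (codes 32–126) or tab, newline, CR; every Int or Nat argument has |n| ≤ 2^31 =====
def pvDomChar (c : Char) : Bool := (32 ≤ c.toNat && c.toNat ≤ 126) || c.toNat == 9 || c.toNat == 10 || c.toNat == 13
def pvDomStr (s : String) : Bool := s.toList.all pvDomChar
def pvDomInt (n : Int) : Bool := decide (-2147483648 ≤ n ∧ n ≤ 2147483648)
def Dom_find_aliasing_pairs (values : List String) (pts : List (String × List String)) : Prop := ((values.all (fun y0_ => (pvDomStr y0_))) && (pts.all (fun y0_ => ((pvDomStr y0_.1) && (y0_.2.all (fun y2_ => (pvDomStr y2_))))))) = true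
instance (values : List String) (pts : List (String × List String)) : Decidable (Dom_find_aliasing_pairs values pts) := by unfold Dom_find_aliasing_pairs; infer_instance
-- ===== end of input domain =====

-- B replaces A's all-pairs set-intersection scan by an inverted index (object -> value indices);
-- objective: faster (asymptotically, work proportional to index groups instead of all pairs).


-- ===== PORT A =====
-- may_alias: both dict lookups, None check, then 'not isdisjoint'
def may_alias (a : String) (b : String) (pts : List (String × List String)) : Bool :=
  let set_a := (PySem.Dict.mk pts).get? a
  let set_b := (PySem.Dict.mk pts).get? b
  match set_a, set_b with
  | some sa, some sb => !(PySem.Set.isdisjoint sa sb)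
  | _, _ => false

def find_aliasing_pairs (values : List String) (pts : List (String × List String)) : List (String × String) :=
  let vals := values
  (PySem.List.pyRange 0 vals.length).foldl (fun pairs i =>
    (PySem.List.pyRange (i + 1) vals.length).foldl (fun pairs j =>
      if may_alias (PySem.List.pyGetD vals i "") (PySem.List.pyGetD vals j "") pts then
        pairs ++ [(PySem.List.pyGetD vals i "", PySem.List.pyGetD vals j "")]
      else pairs) pairs) []

-- ===== PORT B =====
def find_aliasing_pairs_alt (values : List String) (pts : List (String × List String)) : List (String × String) :=
  let vals := values
  let d := PySem.Dict.mk pts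
  -- phase 1: inverted index, object -> list of value indices
  let index : PySem.Dict String (List Int) :=
    (PySem.List.enumerate vals).foldl (fun idx p =>
      (d.getD p.2 []).foldl (fun idx obj => idx.modify obj [] (fun g => g ++ [p.1])) idx)
      PySem.Dict.empty
  -- phase 2: for each value, union of its objects' groups, emitted sorted, keeping j > i
  (PySem.List.enumerate vals).foldl (fun pairs p =>
    let partners : PySem.Set Int :=
      (d.getD p.2 []).foldl (fun s obj => s.update (index.getD obj [])) PySem.Set.empty
    (PySem.List.sorted partners (fun x => x)).foldl (fun pairs j =>
      if j > p.1 then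
        pairs ++ [(PySem.List.pyGetD vals p.1 "", PySem.List.pyGetD vals j "")]
      else pairs) pairs) []

-- ===== PRECONDITION & SPEC =====
def Spec_find_aliasing_pairs (values : List String) (pts : List (String × List String)) (out : List (String × String)) : Prop := out = find_aliasing_pairs_alt values pts
instance (values : List String) (pts : List (String × List String)) (out : List (String × String)) : Decidable (Spec_find_aliasing_pairs values pts out) := by unfold Spec_find_aliasing_pairs; infer_instance

-- ===== CLAIM (what is proved, stated in full; the proofs are below) =====
def Claim_equal_find_aliasing_pairs : Prop := ∀ (values : List String) (pts : List (String × List String)), Dom_find_aliasing_pairs values pts → Spec_find_aliasing_pairs values pts (find_aliasing_pairs values pts)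

-- ===== LEMMAS AND PROOFS =====

-- A's may-alias test as an existential over the two looked-up points-to lists.
theorem may_alias_iff (a b : String) (pts : List (String × List String)) :
    may_alias a b pts = true ↔
      ∃ o, o ∈ (PySem.Dict.mk pts).getD a [] ∧ o ∈ (PySem.Dict.mk pts).getD b [] := by
  unfold may_alias
  have hga : (PySem.Dict.mk pts).getD a [] = ((PySem.Dict.mk pts).get? a).getD [] := rfl
  have hgb : (PySem.Dict.mk pts).getD b [] = ((PySem.Dict.mk pts).get? b).getD [] := rfl
  rw [hga, hgb]
  cases ha : (PySem.Dict.mk pts).get? a <;> cases hb : (PySem.Dict.mk pts).get? b <;> simp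
  rw [← Bool.not_eq_true, PySem.Set.isdisjoint_iff]
  push Not
  tauto

-- membership in one object-group after the inner (per-value) index update
theorem mem_groupFold (S : List String) (i : Int) (idx : PySem.Dict String (List Int))
    (o : String) (j : Int) :
    j ∈ (S.foldl (fun idx obj => idx.modify obj [] (fun g => g ++ [i])) idx).getD o [] ↔
      j ∈ idx.getD o [] ∨ (j = i ∧ o ∈ S) := by
  induction S generalizing idx with
  | nil => simp
  | cons h t ih =>
    simp only [List.foldl_cons]
    rw [ih]
    by_cases ho : o = h
    · subst ho
      rw [PySem.Dict.getD_modify_self]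
      simp [List.mem_append]
      tauto
    · rw [PySem.Dict.getD_modify_of_ne _ _ _ ho]
      simp [ho]

-- membership in one object-group of the full inverted index (phase 1 of B)
theorem mem_indexFold (pts : List (String × List String)) (L : List (Int × String))
    (idx0 : PySem.Dict String (List Int)) (o : String) (j : Int) :
    j ∈ (L.foldl (fun idx p =>
          ((PySem.Dict.mk pts).getD p.2 []).foldl
            (fun idx obj => idx.modify obj [] (fun g => g ++ [p.1])) idx)
        idx0).getD o [] ↔
      j ∈ idx0.getD o [] ∨ ∃ p ∈ L, p.1 = j ∧ o ∈ (PySem.Dict.mk pts).getD p.2 [] := by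
  induction L generalizing idx0 with
  | nil => simp
  | cons h t ih =>
    simp only [List.foldl_cons]
    rw [ih, mem_groupFold]
    simp
    tauto

-- membership in the partner set built by unioning index groups (phase 2 of B)
theorem mem_partnersFold (G : String → List Int) (S : List String) (s : PySem.Set Int) (j : Int) :
    j ∈ S.foldl (fun s obj => PySem.Set.update s (G obj)) s ↔ j ∈ s ∨ ∃ o ∈ S, j ∈ G o := by
  induction S generalizing s with
  | nil => simp
  | cons h t ih =>
    simp only [List.foldl_cons]
    rw [ih, PySem.Set.mem_update]
    simp
    tauto

theorem nodup_partnersFold (G : String → List Int) (S : List String) (s : PySem.Set Int)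
    (hs : s.Nodup) : (S.foldl (fun s obj => PySem.Set.update s (G obj)) s).Nodup := by
  induction S generalizing s with
  | nil => exact hs
  | cons h t ih => exact ih _ (PySem.Set.nodup_update s (G h) hs)

-- Python's range(i+1, n) as the filtered Nat range
theorem pyRange_filter_lt (i n : Nat) :
    PySem.List.pyRange (↑i + 1) ↑n =
      ((List.range n).filter (fun k => decide (i < k))).map (fun k : Nat => (k : Int)) := by
  induction n with
  | zero =>
    have h1 : PySem.List.pyRange (↑i + 1) ((0 : Nat) : Int) = [] := by
      apply List.eq_nil_iff_forall_not_mem.mpr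
      intro x hx
      rw [PySem.List.mem_pyRange_one] at hx
      omega
    norm_num at h1
    simp [h1]
  | succ n ih =>
    rw [List.range_succ, List.filter_append, List.map_append]
    by_cases h : i < n
    · have hle : (↑i + 1 : Int) ≤ ↑n := by exact_mod_cast h
      rw [show ((n + 1 : Nat) : Int) = (↑n : Int) + 1 by push_cast; ring,
        PySem.List.pyRange_one_succ_right hle, ih]
      simp [h]
    · have h1 : PySem.List.pyRange (↑i + 1) ((n + 1 : Nat) : Int) = [] := by
        apply List.eq_nil_iff_forall_not_mem.mpr
        intro x hx
        rw [PySem.List.mem_pyRange_one] at hx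
        push_cast at hx
        omega
    
      have h2 : (List.range n).filter (fun k => decide (i < k)) = [] := by
        rw [List.filter_eq_nil_iff]
        intro a ha
        simp only [List.mem_range] at ha
        simp
        omega
      rw [h1, h2]
      simp [h]

-- the alias predicate on Nat indices
def pvPred (values : List String) (pts : List (String × List String)) (a b : Nat) : Bool :=
  may_alias (PySem.List.pyGetD values ↑a "") (PySem.List.pyGetD values ↑b "") pts

-- B's partner set at index k, sorted, is exactly the filtered index range
theorem sorted_partners_eq (values : List String) (pts : List (String × List String)) (k : Nat) :
    PySem.List.sorted
      (((PySem.Dict.mk pts).getD (PySem.List.pyGetD values ↑k "") []).foldl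
        (fun s obj => PySem.Set.update s
          ((((List.range values.length).map (fun k : Nat => (k : Int))).map
              (fun j => (j, PySem.List.pyGetD values j "")) |>.foldl (fun idx p =>
              ((PySem.Dict.mk pts).getD p.2 []).foldl
                (fun idx obj => idx.modify obj [] (fun g => g ++ [p.1])) idx)
            PySem.Dict.empty).getD obj []))
        PySem.Set.empty)
      (fun x => x) =
    ((List.range values.length).filter (fun m => pvPred values pts k m)).map
      (fun m : Nat => (m : Int)) := by
  rw [← PySem.List.pyRange_zero_natCast, ← PySem.List.len_eq values,
    ← PySem.List.enumerate_eq_map_pyRange values ""]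
  apply PySem.List.sorted_eq_of_perm_of_pairwise_lt
  · apply (List.perm_ext_iff_of_nodup ?_ ?_).mpr
    · intro j
      rw [mem_partnersFold]
      constructor
      · intro hj
        simp only [List.mem_map, List.mem_filter, List.mem_range] at hj
        obtain ⟨m, ⟨hm, hpred⟩, rfl⟩ := hj
        simp only [pvPred] at hpred
        rw [may_alias_iff] at hpred
        obtain ⟨o, hok, hom⟩ := hpred
        right
        refine ⟨o, hok, ?_⟩
        rw [mem_indexFold]
        right
        refine ⟨(↑m, values[m]), ?_, by simp, ?_⟩
        · rw [PySem.List.mem_enumerate_iff]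
          exact ⟨m, hm, by simp⟩
        · have : PySem.List.pyGetD values (↑m) "" = values[m] := by
            rw [PySem.List.pyGetD_natCast, List.getD_eq_getElem _ _ hm]
          rw [this] at hom
          simpa using hom
      · rintro (hj | ⟨o, ho, hjo⟩)
        · simp at hj
        · rw [mem_indexFold] at hjo
          rcases hjo with hj0 | ⟨p, hp, hpj, hop⟩
          · simp [PySem.Dict.empty, PySem.Dict.getD, PySem.Dict.get?] at hj0
          · rw [PySem.List.mem_enumerate_iff] at hp
            obtain ⟨m, hm, rfl⟩ := hp
            simp only [List.mem_map, List.mem_filter, List.mem_range]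
            refine ⟨m, ⟨hm, ?_⟩, by simpa using hpj⟩
            simp only [pvPred]
            rw [may_alias_iff]
            refine ⟨o, ho, ?_⟩
            have : PySem.List.pyGetD values (↑m) "" = values[m] := by
              rw [PySem.List.pyGetD_natCast, List.getD_eq_getElem _ _ hm]
            rw [this]
            simpa using hop
    · exact (List.Nodup.filter _ (List.nodup_range)).map (fun a b h => by exact_mod_cast h)
    · exact nodup_partnersFold _ _ _ List.nodup_nil
  · refine List.Pairwise.map _ (fun a b h => ?_) ((List.pairwise_lt_range).sublist List.filter_sublist)
    exact_mod_cast h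

-- ===== assembling the two folds =====
-- the inner loops agree: A's scan of range(i+1, n) equals B's scan of the sorted partner set
theorem inner_eq (values : List String) (pts : List (String × List String)) (k : Nat)
    (acc : List (String × String)) :
    (PySem.List.pyRange (↑k + 1) ↑values.length).foldl (fun pairs j =>
        if may_alias (PySem.List.pyGetD values ↑k "") (PySem.List.pyGetD values j "") pts = true then
          pairs ++ [(PySem.List.pyGetD values ↑k "", PySem.List.pyGetD values j "")]
        else pairs) acc =
    (PySem.List.sorted
      (((PySem.Dict.mk pts).getD (PySem.List.pyGetD values ↑k "") []).foldl
        (fun s obj => PySem.Set.update s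
          ((((List.range values.length).map (fun k : Nat => (k : Int))).map
              (fun j => (j, PySem.List.pyGetD values j "")) |>.foldl (fun idx p =>
              ((PySem.Dict.mk pts).getD p.2 []).foldl
                (fun idx obj => idx.modify obj [] (fun g => g ++ [p.1])) idx)
            PySem.Dict.empty).getD obj []))
        PySem.Set.empty)
      (fun x => x)).foldl (fun pairs j =>
        if j > (↑k : Int) then
          pairs ++ [(PySem.List.pyGetD values ↑k "", PySem.List.pyGetD values j "")]
        else pairs) acc := by
  rw [sorted_partners_eq values pts k]
  rw [PySem.List.foldl_append_if
    (fun j => may_alias (PySem.List.pyGetD values ↑k "") (PySem.List.pyGetD values j "") pts)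
    (fun j => (PySem.List.pyGetD values ↑k "", PySem.List.pyGetD values j ""))]
  rw [show (fun (pairs : List (String × String)) (j : Int) =>
        if j > (↑k : Int) then
          pairs ++ [(PySem.List.pyGetD values ↑k "", PySem.List.pyGetD values j "")]
        else pairs) =
      (fun (pairs : List (String × String)) (j : Int) =>
        if (decide ((↑k : Int) < j)) = true then
          pairs ++ [(PySem.List.pyGetD values ↑k "", PySem.List.pyGetD values j "")]
        else pairs) from by
    funext pairs j
    simp only [gt_iff_lt, decide_eq_true_eq]]
  rw [PySem.List.foldl_append_if (fun j => decide ((↑k : Int) < j))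
    (fun j => (PySem.List.pyGetD values ↑k "", PySem.List.pyGetD values j ""))]
  congr 1
  rw [List.filter_map, List.map_map]
  rw [show ((fun j => decide ((↑k : Int) < j)) ∘ (fun m : Nat => (m : Int))) =
      (fun m : Nat => decide (k < m)) from by funext m; simp]
  rw [List.filter_comm]
  rw [pyRange_filter_lt k values.length, List.filter_map, List.map_map]
  rfl

theorem main_eq (values : List String) (pts : List (String × List String)) :
    find_aliasing_pairs values pts = find_aliasing_pairs_alt values pts := by
  simp only [find_aliasing_pairs, find_aliasing_pairs_alt]
  rw [PySem.List.enumerate_eq_map_pyRange values "", PySem.List.len_eq,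
    PySem.List.pyRange_zero_natCast values.length]
  rw [List.foldl_map, List.foldl_map, List.foldl_map]
  apply PySem.List.foldl_congr_mem
  intro acc m _
  exact inner_eq values pts m acc

-- ===== VERDICT (by name: the statement is the Claim_ definition above) =====
theorem find_aliasing_pairs_spec : Claim_equal_find_aliasing_pairs := by
  intro values pts _
  unfold Spec_find_aliasing_pairs
  exact main_eq values pts
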